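-- pv_equiv track=rewrite | github.com/c-mita/AoC | 2025/10.py | toggle_switches
-- ===== SOURCE A (Python) =====
-- def toggle_switches(target, switches):
--
--     def bfs(start=0, target=0, options=()):
--         front = [start]
--         visited = set(front)
--         d = 0
--         while front:
--             next_front = set()
--             for pos in front:
--                 if pos == target:
--                     return d
--                 for option in options:
--                     npos = pos ^ option
--                     if npos in visited:
--                         continue
--                     next_front.add(npos)
--                     visited.add(npos)
--             front = next_front
--             d += 1
--         raise ValueError("Could not complete")
--
--     t = 0
--     # the LSB refers to the first target light
--     # reverse the light order so this lines up with our
--     # bit operations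
--     for s in reversed(target):
--         t <<= 1
--         if s == "#":
--             t |= 1
--     toggles = []
--     for switch in switches:
--         toggle = 0
--         for v in switch:
--             toggle |= 1 << v
--         toggles.append(toggle)
--     return bfs(0, t, toggles)
-- ===== SOURCE B (Python) =====
-- def toggle_switches(target, switches):
--     # identical preprocessing to A: build target bitmask and toggle bitmasks
--     t = 0
--     for s in reversed(target):
--         t <<= 1
--         if s == "#":
--             t |= 1
--     toggles = []
--     for switch in switches:
--         toggle = 0
--         for v in switch:
--             toggle |= 1 << v
--         toggles.append(toggle)
--
--     def found(rest, k, acc):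
--         # is there a combination of k toggles among `rest` whose XOR with acc equals t?
--         if k == 0:
--             return acc == t
--         if len(rest) < k:
--             return False
--         return found(rest[1:], k - 1, acc ^ rest[0]) or found(rest[1:], k, acc)
--
--     # iterative deepening over subset sizes: the first k that works is the minimum
--     for k in range(len(toggles) + 1):
--         if found(toggles, k, 0):
--             return k
--     raise ValueError("Could not complete")
-- ===== Notes on version B (the rewrite author's own statement) =====
-- stated objective: alternative
-- what changed: Replaces the BFS over light-state bitmasks with a visited set by an iterative-deepening DFS over toggle combinations: for k = 0..n it searches for a size-k subset of toggles whose XOR is the target, returning the first k found.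
import Mathlib
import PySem

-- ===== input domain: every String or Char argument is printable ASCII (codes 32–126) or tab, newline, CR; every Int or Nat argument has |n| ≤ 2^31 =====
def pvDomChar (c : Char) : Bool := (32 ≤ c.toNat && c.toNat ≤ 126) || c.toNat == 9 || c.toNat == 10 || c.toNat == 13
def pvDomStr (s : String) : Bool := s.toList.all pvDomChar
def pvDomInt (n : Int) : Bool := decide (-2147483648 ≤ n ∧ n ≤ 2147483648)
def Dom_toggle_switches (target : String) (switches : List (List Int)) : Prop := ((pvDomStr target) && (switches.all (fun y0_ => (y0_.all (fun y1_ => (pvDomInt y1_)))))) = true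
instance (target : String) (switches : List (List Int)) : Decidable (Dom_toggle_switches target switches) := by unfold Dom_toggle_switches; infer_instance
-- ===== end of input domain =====

-- B replaces A's BFS over light states by an iterative-deepening search over toggle
-- combinations of increasing size (objective: alternative; return value only).

-- ===== PORT A =====
-- shared preprocessing (the Python of A and of B is literally identical here):
-- the target bitmask, built LSB-first from the reversed string
def pvMkTarget (target : String) : Int :=
  target.toList.reverse.foldl
    (fun t s => if s == '#' then PySem.Int.bor (t <<< (1 : Nat)) 1 else t <<< (1 : Nat)) 0

-- `1 << v`: `v.toNat` is exact for 0 ≤ v; Python raises ValueError on v < 0 (outside Pre_)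
def pvMkToggle (switch : List Int) : Int :=
  switch.foldl (fun toggle v => PySem.Int.bor toggle ((1 : Int) <<< (v.toNat : Nat))) 0

def pvMkToggles (switches : List (List Int)) : List Int :=
  switches.foldl (fun toggles switch => toggles ++ [pvMkToggle switch]) []

-- `for option in options: …` for one `pos`; state = (next_front, visited)
def pvExpandPos (opts : List Int) (pos : Int) (st : PySem.Set Int × PySem.Set Int) :
    PySem.Set Int × PySem.Set Int :=
  opts.foldl
    (fun st option =>
      let npos := PySem.Int.bxor pos option
      if PySem.Set.contains st.2 npos then st
      else (PySem.Set.add st.1 npos, PySem.Set.add st.2 npos))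
    st

-- `for pos in front: …`; `none` = the `return d` inside the loop fired
def pvLevel (tgt : Int) (opts : List Int) :
    List Int → PySem.Set Int × PySem.Set Int → Option (PySem.Set Int × PySem.Set Int)
  | [], st => some st
  | pos :: rest, st =>
    if pos == tgt then none
    else pvLevel tgt opts rest (pvExpandPos opts pos st)

-- `while front:` with a fuel guard (the BFS visits at most 2^|toggles| states, so the
-- fuel never runs out on inputs where the Python returns); -1 stands for the two
-- unreachable-under-Pre_ exits (fuel exhausted / `raise ValueError`)
def pvBfs (tgt : Int) (opts : List Int) :
    Nat → List Int → PySem.Set Int → Int → Int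
  | 0, _, _, _ => -1
  | fuel + 1, front, visited, d =>
    if front.isEmpty then -1
    else
      match pvLevel tgt opts front (PySem.Set.empty, visited) with
      | none => d
      | some (nf, vis) => pvBfs tgt opts fuel nf vis (d + 1)

def toggle_switches (target : String) (switches : List (List Int)) : Int :=
  let t := pvMkTarget target
  let toggles := pvMkToggles switches
  pvBfs t toggles (2 ^ toggles.length + 2) [0] (PySem.Set.ofList [0]) 0

-- ===== PORT B =====
-- `found(rest, k, acc)`: some k elements of rest XOR together with acc to give t?
def pvFound (t : Int) : List Int → Int → Int → Bool
  | rest, k, acc =>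
    if k == 0 then acc == t
    else if (rest.length : Int) < k then false
    else
      match rest with
      | [] => false
      | x :: xs => pvFound t xs (k - 1) (PySem.Int.bxor acc x) || pvFound t xs k acc
  termination_by rest _ _ => rest.length

-- `for k in range(len(toggles) + 1): …`; -1 stands for `raise ValueError` (outside Pre_)
def pvDeepen (t : Int) (toggles : List Int) : List Int → Int
  | [] => -1
  | k :: ks => if pvFound t toggles k 0 then k else pvDeepen t toggles ks

def toggle_switches_alt (target : String) (switches : List (List Int)) : Int :=
  let t := pvMkTarget target
  let toggles := pvMkToggles switches
  pvDeepen t toggles (PySem.List.pyRange 0 ((toggles.length : Int) + 1))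

-- ===== PRECONDITION & SPEC =====
def pvXorAll (l : List Int) : Int := l.foldr PySem.Int.bxor 0

-- Pre_ excludes exactly the inputs where A raises ValueError: a negative switch entry
-- (`1 << v` raises) or a target mask that is no XOR of a subset of the toggle masks
-- (the bfs floods out and raises "Could not complete").
def Pre_toggle_switches (target : String) (switches : List (List Int)) : Prop :=
  (switches.all (fun sw => sw.all (fun v => decide (0 ≤ v))) = true) ∧
  ((pvMkToggles switches).sublists.any
      (fun l => pvXorAll l == pvMkTarget target) = true)

instance (target : String) (switches : List (List Int)) :
    Decidable (Pre_toggle_switches target switches) := by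
  unfold Pre_toggle_switches; infer_instance

def pvWitness_toggle_switches : String × List (List Int) := ("#", [[0]])

def Spec_toggle_switches (target : String) (switches : List (List Int)) (out : Int) : Prop :=
  out = toggle_switches_alt target switches
instance (target : String) (switches : List (List Int)) (out : Int) :
    Decidable (Spec_toggle_switches target switches out) := by
  unfold Spec_toggle_switches; infer_instance

-- ===== CLAIM (what is proved, stated in full; the proofs are below) =====
def Claim_equal_toggle_switches : Prop :=
  ∀ (target : String) (switches : List (List Int)),
    Dom_toggle_switches target switches → Pre_toggle_switches target switches →
      Spec_toggle_switches target switches (toggle_switches target switches)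

-- ===== LEMMAS AND PROOFS =====

-- minimal-subset reachability: the notion both programs compute
def pvReach (S : List Int) (k : Nat) (x : Int) : Prop :=
  ∃ l ∈ S.sublists, l.length = k ∧ pvXorAll l = x

def pvMinD (S : List Int) (d : Nat) (x : Int) : Prop :=
  pvReach S d x ∧ ∀ j < d, ¬ pvReach S j x

theorem pv_bxor_nonneg {a b : Int} (ha : 0 ≤ a) (hb : 0 ≤ b) : 0 ≤ PySem.Int.bxor a b := by
  rw [PySem.Int.bxor_of_nonneg ha hb]; positivity

theorem pv_zero_bxor (a : Int) : PySem.Int.bxor 0 a = a := by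
  rw [PySem.Int.bxor_comm]; exact PySem.Int.bxor_zero a

theorem pv_bxor_assoc {a b c : Int} (ha : 0 ≤ a) (hb : 0 ≤ b) (hc : 0 ≤ c) :
    PySem.Int.bxor (PySem.Int.bxor a b) c = PySem.Int.bxor a (PySem.Int.bxor b c) := by
  rw [PySem.Int.bxor_of_nonneg ha hb, PySem.Int.bxor_of_nonneg hb hc,
    PySem.Int.bxor_of_nonneg (by positivity) hc, PySem.Int.bxor_of_nonneg ha (by positivity)]
  simp [Nat.xor_assoc]

theorem pv_bxor_cancel {a b : Int} (ha : 0 ≤ a) (hb : 0 ≤ b) :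
    PySem.Int.bxor a (PySem.Int.bxor a b) = b := by
  rw [PySem.Int.bxor_of_nonneg ha hb, PySem.Int.bxor_of_nonneg ha (by positivity)]
  simp [Int.toNat_of_nonneg hb]

theorem pv_xorAll_nonneg {l : List Int} (h : ∀ x ∈ l, 0 ≤ x) : 0 ≤ pvXorAll l := by
  induction l with
  | nil => simp [pvXorAll]
  | cons x xs ih =>
    exact pv_bxor_nonneg (h x (by simp)) (ih fun y hy => h y (by simp [hy]))

theorem pv_xorAll_append {l₁ l₂ : List Int} (h₁ : ∀ x ∈ l₁, 0 ≤ x) (h₂ : ∀ x ∈ l₂, 0 ≤ x) :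
    pvXorAll (l₁ ++ l₂) = PySem.Int.bxor (pvXorAll l₁) (pvXorAll l₂) := by
  induction l₁ with
  | nil => simp [pvXorAll, PySem.Int.bxor_comm 0, PySem.Int.bxor_zero]
  | cons x xs ih =>
    have hx := h₁ x (by simp)
    have hxs : ∀ y ∈ xs, 0 ≤ y := fun y hy => h₁ y (by simp [hy])
    show PySem.Int.bxor x (pvXorAll (xs ++ l₂)) = _
    rw [ih hxs, ← pv_bxor_assoc hx (pv_xorAll_nonneg hxs) (pv_xorAll_nonneg h₂)]
    rfl

theorem pv_xorAll_perm {l₁ l₂ : List Int} (hp : l₁.Perm l₂) (h₁ : ∀ x ∈ l₁, 0 ≤ x) :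
    pvXorAll l₁ = pvXorAll l₂ := by
  induction hp with
  | nil => rfl
  | cons x _ ih =>
    exact congrArg (PySem.Int.bxor x) (ih fun y hy => h₁ y (by simp [hy]))
  | swap x y l =>
    have hx : (0:Int) ≤ x := h₁ x (by simp)
    have hy : (0:Int) ≤ y := h₁ y (by simp)
    have hl : (0:Int) ≤ pvXorAll l := pv_xorAll_nonneg fun z hz => h₁ z (by simp [hz])
    show PySem.Int.bxor y (PySem.Int.bxor x (pvXorAll l))
        = PySem.Int.bxor x (PySem.Int.bxor y (pvXorAll l))
    rw [← pv_bxor_assoc hy hx hl, ← pv_bxor_assoc hx hy hl, PySem.Int.bxor_comm x y]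
  | trans p₁ _ ih₁ ih₂ =>
    exact (ih₁ h₁).trans (ih₂ fun y hy => h₁ y (p₁.mem_iff.mpr hy))

theorem pv_xorAll_cons (x : Int) (l : List Int) :
    pvXorAll (x :: l) = PySem.Int.bxor x (pvXorAll l) := rfl

theorem pv_bxor_left_comm {a b c : Int} (ha : 0 ≤ a) (hb : 0 ≤ b) (hc : 0 ≤ c) :
    PySem.Int.bxor a (PySem.Int.bxor b c) = PySem.Int.bxor b (PySem.Int.bxor a c) := by
  rw [← pv_bxor_assoc ha hb hc, PySem.Int.bxor_comm a b, pv_bxor_assoc hb ha hc]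

theorem pv_reach_nonneg {S : List Int} (hS : ∀ x ∈ S, 0 ≤ x) {k : Nat} {x : Int}
    (h : pvReach S k x) : 0 ≤ x := by
  obtain ⟨l, hl, -, hx⟩ := h
  exact hx ▸ pv_xorAll_nonneg fun y hy => hS y ((List.mem_sublists.mp hl).mem hy)

theorem pv_reach_subperm {S : List Int} (hS : ∀ x ∈ S, 0 ≤ x) {k : Nat} {x : Int} :
    pvReach S k x ↔ ∃ l, l.Subperm S ∧ l.length = k ∧ pvXorAll l = x := by
  constructor
  · rintro ⟨l, hl, hlen, hx⟩
    exact ⟨l, (List.mem_sublists.mp hl).subperm, hlen, hx⟩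
  · rintro ⟨l, ⟨m, hm, hms⟩, hlen, hx⟩
    refine ⟨m, List.mem_sublists.mpr hms, by rw [hm.length_eq, hlen], ?_⟩
    rw [pv_xorAll_perm hm fun y hy => hS y (hms.mem hy), hx]

theorem pv_reach_singleton {S : List Int} {o : Int} (ho : o ∈ S) : pvReach S 1 o := by
  refine ⟨[o], List.mem_sublists.mpr (List.singleton_sublist.mpr ho), rfl, ?_⟩
  show PySem.Int.bxor o 0 = o
  exact PySem.Int.bxor_zero o

theorem pv_reach_join {S : List Int} (hS : ∀ x ∈ S, 0 ≤ x) :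
    ∀ (n : Nat) {i j : Nat} {x y : Int}, i + j ≤ n → pvReach S i x → pvReach S j y →
    ∃ k ≤ i + j, pvReach S k (PySem.Int.bxor x y) := by
  intro n
  induction n with
  | zero =>
    rintro i j x y hn hx hy
    have hi : i = 0 := by omega
    have hj : j = 0 := by omega
    subst hi hj
    obtain ⟨l, -, hlen, hxl⟩ := hx
    obtain ⟨r, -, hrlen, hyl⟩ := hy
    rw [List.length_eq_zero_iff.mp hlen] at hxl
    rw [List.length_eq_zero_iff.mp hrlen] at hyl
    refine ⟨0, le_refl _, [], by simp, rfl, ?_⟩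
    rw [← hxl, ← hyl]
    simp [pvXorAll, PySem.Int.bxor_zero]
  | succ n ih =>
    rintro i j x y hn hx hy
    obtain ⟨m, hmS, hmlen, hmx⟩ := (pv_reach_subperm hS).mp hx
    obtain ⟨r, hrS, hrlen, hry⟩ := (pv_reach_subperm hS).mp hy
    have hmpos : ∀ z ∈ m, 0 ≤ z := fun z hz => hS z (hmS.subset hz)
    have hrpos : ∀ z ∈ r, 0 ≤ z := fun z hz => hS z (hrS.subset hz)
    by_cases hmr : (m ++ r).Subperm S
    · refine ⟨i + j, le_refl _, (pv_reach_subperm hS).mpr ⟨m ++ r, hmr, by simp [hmlen, hrlen], ?_⟩⟩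
      rw [pv_xorAll_append hmpos hrpos, hmx, hry]
    · rw [List.subperm_ext_iff] at hmr
      push_neg at hmr
      obtain ⟨v, hv, hcnt⟩ := hmr
      have hvm : v ∈ m := by
        by_contra hvm
        have : (m ++ r).count v = r.count v := by
          simp [List.count_append, List.count_eq_zero.mpr hvm]
        exact absurd (hrS.count_le v) (by omega)
      have hvr : v ∈ r := by
        by_contra hvr
        have : (m ++ r).count v = m.count v := by
          simp [List.count_append, List.count_eq_zero.mpr hvr]
        exact absurd (hmS.count_le v) (by omega)
      have hvpos : (0:Int) ≤ v := hmpos v hvm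
      have hxpos : (0:Int) ≤ x := pv_reach_nonneg hS hx
      have hypos : (0:Int) ≤ y := pv_reach_nonneg hS hy
      have herase : ∀ (l : List Int) (hvl : v ∈ l) (hl : ∀ z ∈ l, (0:Int) ≤ z),
          pvXorAll (l.erase v) = PySem.Int.bxor v (pvXorAll l) := by
        intro l hvl hl
        have hperm := List.perm_cons_erase hvl
        have h2 : ∀ z ∈ l.erase v, (0:Int) ≤ z := fun z hz => hl z (List.erase_sublist.mem hz)
        rw [pv_xorAll_perm hperm hl, pv_xorAll_cons, pv_bxor_cancel (hl v hvl) (pv_xorAll_nonneg h2)]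
      have hi : 1 ≤ i := by rw [← hmlen]; exact List.length_pos_of_mem hvm
      have hj : 1 ≤ j := by rw [← hrlen]; exact List.length_pos_of_mem hvr
      have hrx : pvReach S (i - 1) (PySem.Int.bxor v x) := by
        refine (pv_reach_subperm hS).mpr ⟨m.erase v, List.erase_sublist.subperm.trans hmS, ?_, ?_⟩
        · rw [List.length_erase_of_mem hvm, hmlen]
        · rw [herase m hvm hmpos, hmx]
      have hrey : pvReach S (j - 1) (PySem.Int.bxor v y) := by
        refine (pv_reach_subperm hS).mpr ⟨r.erase v, List.erase_sublist.subperm.trans hrS, ?_, ?_⟩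
        · rw [List.length_erase_of_mem hvr, hrlen]
        · rw [herase r hvr hrpos, hry]
      obtain ⟨k, hk, hrk⟩ := ih (i := i - 1) (j := j - 1) (by omega) hrx hrey
      refine ⟨k, by omega, ?_⟩
      have hkey : PySem.Int.bxor (PySem.Int.bxor v x) (PySem.Int.bxor v y)
          = PySem.Int.bxor x y := by
        rw [pv_bxor_assoc hvpos hxpos (pv_bxor_nonneg hvpos hypos),
          pv_bxor_left_comm hxpos hvpos hypos,
          pv_bxor_cancel hvpos (pv_bxor_nonneg hxpos hypos)]
      rw [← hkey]; exact hrk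


theorem pv_found_iff {t : Int} :
    ∀ (rest : List Int), (∀ x ∈ rest, 0 ≤ x) → ∀ (k acc : Int), 0 ≤ k → 0 ≤ acc →
      (pvFound t rest k acc = true ↔
        ∃ l, l.Sublist rest ∧ (l.length : Int) = k ∧ PySem.Int.bxor acc (pvXorAll l) = t) := by
  intro rest
  induction rest with
  | nil =>
    intro _ k acc hk hacc
    by_cases hk0 : k = 0
    · subst hk0
      simp only [pvFound, beq_iff_eq, if_true, beq_self_eq_true]
      constructor
      · rintro rfl
        exact ⟨[], List.Sublist.refl _, rfl, by simp [pvXorAll, PySem.Int.bxor_zero]⟩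
      · rintro ⟨l, hl, hlen, hx⟩
        rw [List.sublist_nil.mp hl] at hx
        rwa [show pvXorAll [] = 0 from rfl, PySem.Int.bxor_zero] at hx
    · simp only [pvFound, beq_iff_eq, if_neg hk0]
      constructor
      · intro h
        exfalso
        revert h
        split <;> simp
      · rintro ⟨l, hl, hlen, -⟩
        rw [List.sublist_nil.mp hl] at hlen
        exact absurd hlen.symm (by simpa using hk0)
  | cons x xs ih =>
    intro hpos k acc hk hacc
    have hx : (0:Int) ≤ x := hpos x (by simp)
    have hxs : ∀ y ∈ xs, 0 ≤ y := fun y hy => hpos y (by simp [hy])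
    by_cases hk0 : k = 0
    · subst hk0
      simp only [pvFound, beq_iff_eq, if_true, beq_self_eq_true]
      constructor
      · rintro rfl
        exact ⟨[], List.nil_sublist _, rfl, by simp [pvXorAll, PySem.Int.bxor_zero]⟩
      · rintro ⟨l, hl, hlen, hxl⟩
        have : l = [] := List.length_eq_zero_iff.mp (by exact_mod_cast hlen)
        subst this
        rwa [show pvXorAll [] = 0 from rfl, PySem.Int.bxor_zero] at hxl
    · by_cases hlen : ((x :: xs).length : Int) < k
      · rw [show pvFound t (x :: xs) k acc = false by
          simp only [pvFound, beq_iff_eq, if_neg hk0, if_pos hlen]]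
        simp only [Bool.false_eq_true, false_iff]
        rintro ⟨l, hl, hllen, -⟩
        have := hl.length_le
        simp only [List.length_cons] at hlen this
        omega
      · rw [show pvFound t (x :: xs) k acc
            = (pvFound t xs (k - 1) (PySem.Int.bxor acc x) || pvFound t xs k acc) by
          simp only [pvFound, beq_iff_eq, if_neg hk0, if_neg hlen]]
        rw [Bool.or_eq_true,
          ih hxs (k - 1) (PySem.Int.bxor acc x) (by omega) (pv_bxor_nonneg hacc hx),
          ih hxs k acc hk hacc]
        constructor
        · rintro (⟨l, hl, hllen, hxl⟩ | ⟨l, hl, hllen, hxl⟩)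
          · refine ⟨x :: l, List.cons_sublist_cons.mpr hl, by simp only [List.length_cons]; push_cast; push_cast at hllen; omega, ?_⟩
            rw [pv_xorAll_cons, ← pv_bxor_assoc hacc hx (pv_xorAll_nonneg fun y hy => hxs y (hl.mem hy))]
            exact hxl
          · exact ⟨l, hl.trans (List.sublist_cons_self x xs), hllen, hxl⟩
        · rintro ⟨l, hl, hllen, hxl⟩
          rcases List.sublist_cons_iff.mp hl with h | ⟨r, rfl, hr⟩
          · exact Or.inr ⟨l, h, hllen, hxl⟩
          · refine Or.inl ⟨r, hr, by simp only [List.length_cons] at hllen; push_cast at hllen; push_cast; omega, ?_⟩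
            rw [pv_xorAll_cons, ← pv_bxor_assoc hacc hx
              (pv_xorAll_nonneg fun y hy => hxs y (hr.mem hy))] at hxl
            exact hxl


theorem pv_found_reach {t : Int} {S : List Int} (hS : ∀ x ∈ S, 0 ≤ x) (k : Nat) :
    pvFound t S (k : Int) 0 = true ↔ pvReach S k t := by
  rw [pv_found_iff S hS (k : Int) 0 (by positivity) (le_refl 0)]
  unfold pvReach
  constructor
  · rintro ⟨l, hl, hlen, hx⟩
    exact ⟨l, List.mem_sublists.mpr hl, by exact_mod_cast hlen, by rwa [pv_zero_bxor] at hx⟩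
  · rintro ⟨l, hl, hlen, hx⟩
    exact ⟨l, List.mem_sublists.mp hl, by exact_mod_cast hlen, by rwa [pv_zero_bxor]⟩

theorem pv_deepen_eq {t : Int} {S : List Int} (hS : ∀ x ∈ S, 0 ≤ x) {dm : Nat}
    (hmin : pvMinD S dm t) (hdm : dm < S.length + 1) :
    ∀ a : Nat, a ≤ dm →
      pvDeepen t S (PySem.List.pyRange (a : Int) ((S.length : Int) + 1)) = (dm : Int) := by
  intro a ha
  induction hd : dm - a generalizing a with
  | zero =>
    have : a = dm := by omega
    subst this
    rw [PySem.List.pyRange_one_cons (by exact_mod_cast by omega)]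
    unfold pvDeepen
    rw [if_pos ((pv_found_reach hS a).mpr hmin.1)]
  | succ n ih =>
    rw [PySem.List.pyRange_one_cons (by exact_mod_cast by omega)]
    unfold pvDeepen
    rw [if_neg (by
      simp only [Bool.not_eq_true]
      rw [Bool.eq_false_iff, Ne, pv_found_reach hS a]
      exact hmin.2 a (by omega))]
    have := ih (a + 1) (by omega) (by omega)
    rw [← this]
    norm_num


theorem pv_expand_pos {V : List Int} (p : Int) :
    ∀ (opts : List Int) (nf vis : PySem.Set Int),
      (∀ z, z ∈ vis ↔ z ∈ V ∨ z ∈ nf) →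
      ∀ z, (z ∈ (pvExpandPos opts p (nf, vis)).1 ↔
              z ∈ nf ∨ ((∃ o ∈ opts, z = PySem.Int.bxor p o) ∧ z ∉ V))
         ∧ (z ∈ (pvExpandPos opts p (nf, vis)).2 ↔
              z ∈ V ∨ z ∈ (pvExpandPos opts p (nf, vis)).1) := by
  intro opts
  induction opts with
  | nil =>
    intro nf vis hinv z
    simp only [pvExpandPos, List.foldl_nil]
    simp [hinv z]
  | cons o os ih =>
    intro nf vis hinv z
    have hstep : pvExpandPos (o :: os) p (nf, vis)
        = pvExpandPos os p (if PySem.Set.contains vis (PySem.Int.bxor p o) then (nf, vis)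
            else (PySem.Set.add nf (PySem.Int.bxor p o), PySem.Set.add vis (PySem.Int.bxor p o))) := by
      simp only [pvExpandPos, List.foldl_cons]
    by_cases hc : PySem.Set.contains vis (PySem.Int.bxor p o)
    · rw [hstep, if_pos hc]
      have hmem := (PySem.Set.contains_iff vis (PySem.Int.bxor p o)).mp hc
      obtain ⟨h1, h2⟩ := ih nf vis hinv z
      refine ⟨h1.trans ?_, h2⟩
      constructor
      · rintro (h | ⟨⟨w, hw, rfl⟩, hV⟩)
        · exact Or.inl h
        · exact Or.inr ⟨⟨w, by simp [hw], rfl⟩, hV⟩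
      · rintro (h | ⟨⟨w, hw, rfl⟩, hV⟩)
        · exact Or.inl h
        · rcases List.mem_cons.mp hw with rfl | hw'
          · rcases (hinv _).mp hmem with h | h
            · exact absurd h hV
            · exact Or.inl h
          · exact Or.inr ⟨⟨w, hw', rfl⟩, hV⟩
    · rw [hstep, if_neg hc]
      have hnmem : PySem.Int.bxor p o ∉ vis := fun h => hc ((PySem.Set.contains_iff _ _).mpr h)
      have hnV : PySem.Int.bxor p o ∉ V := fun h => hnmem ((hinv _).mpr (Or.inl h))
      have hnnf : PySem.Int.bxor p o ∉ nf := fun h => hnmem ((hinv _).mpr (Or.inr h))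
      have hinv' : ∀ z, z ∈ PySem.Set.add vis (PySem.Int.bxor p o) ↔
          z ∈ V ∨ z ∈ PySem.Set.add nf (PySem.Int.bxor p o) := by
        intro z
        rw [PySem.Set.mem_add, PySem.Set.mem_add, hinv z]
        tauto
      obtain ⟨h1, h2⟩ := ih _ _ hinv' z
      refine ⟨h1.trans ?_, h2⟩
      rw [PySem.Set.mem_add]
      constructor
      · rintro ((h | rfl) | ⟨⟨w, hw, rfl⟩, hV⟩)
        · exact Or.inl h
        · exact Or.inr ⟨⟨o, by simp, rfl⟩, hnV⟩
        · exact Or.inr ⟨⟨w, by simp [hw], rfl⟩, hV⟩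
      · rintro (h | ⟨⟨w, hw, rfl⟩, hV⟩)
        · exact Or.inl (Or.inl h)
        · rcases List.mem_cons.mp hw with rfl | hw'
          · exact Or.inl (Or.inr rfl)
          · exact Or.inr ⟨⟨w, hw', rfl⟩, hV⟩

theorem pv_expand_fold {S : List Int} {V : List Int} :
    ∀ (F : List Int) (nf vis : PySem.Set Int),
      (∀ z, z ∈ vis ↔ z ∈ V ∨ z ∈ nf) →
      ∀ z, (z ∈ (F.foldl (fun st pos => pvExpandPos S pos st) (nf, vis)).1 ↔
              z ∈ nf ∨ ((∃ p ∈ F, ∃ o ∈ S, z = PySem.Int.bxor p o) ∧ z ∉ V))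
         ∧ (z ∈ (F.foldl (fun st pos => pvExpandPos S pos st) (nf, vis)).2 ↔
              z ∈ V ∨ z ∈ (F.foldl (fun st pos => pvExpandPos S pos st) (nf, vis)).1) := by
  intro F
  induction F with
  | nil =>
    intro nf vis hinv z
    simp only [List.foldl_nil]
    simp [hinv z]
  | cons p ps ih =>
    intro nf vis hinv z
    simp only [List.foldl_cons]
    have hinv' : ∀ z, z ∈ (pvExpandPos S p (nf, vis)).2 ↔ z ∈ V ∨ z ∈ (pvExpandPos S p (nf, vis)).1 :=
      fun z => (pv_expand_pos p S nf vis hinv z).2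
    have h1 : ∀ z, z ∈ (pvExpandPos S p (nf, vis)).1 ↔
        z ∈ nf ∨ ((∃ o ∈ S, z = PySem.Int.bxor p o) ∧ z ∉ V) :=
      fun z => (pv_expand_pos p S nf vis hinv z).1
    obtain ⟨g1, g2⟩ := ih (pvExpandPos S p (nf, vis)).1 (pvExpandPos S p (nf, vis)).2 hinv' z
    constructor
    · rw [g1, h1 z]
      constructor
      · rintro ((h | ⟨⟨o, ho, rfl⟩, hV⟩) | ⟨⟨q, hq, o, ho, rfl⟩, hV⟩)
        · exact Or.inl h
        · exact Or.inr ⟨⟨p, by simp, o, ho, rfl⟩, hV⟩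
        · exact Or.inr ⟨⟨q, by simp [hq], o, ho, rfl⟩, hV⟩
      · rintro (h | ⟨⟨q, hq, o, ho, rfl⟩, hV⟩)
        · exact Or.inl (Or.inl h)
        · rcases List.mem_cons.mp hq with rfl | hq'
          · exact Or.inl (Or.inr ⟨⟨o, ho, rfl⟩, hV⟩)
          · exact Or.inr ⟨⟨q, hq', o, ho, rfl⟩, hV⟩
    · exact g2


theorem pv_level_none {t : Int} {S : List Int} :
    ∀ (F : List Int) (st : PySem.Set Int × PySem.Set Int),
      pvLevel t S F st = none ↔ t ∈ F := by
  intro F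
  induction F with
  | nil => intro st; simp [pvLevel]
  | cons p ps ih =>
    intro st
    by_cases hp : p = t
    · subst hp; simp [pvLevel]
    · rw [show pvLevel t S (p :: ps) st = pvLevel t S ps (pvExpandPos S p st) by
        simp [pvLevel, hp]]
      rw [ih]
      simp [Ne.symm hp]

theorem pv_level_some {t : Int} {S : List Int} :
    ∀ (F : List Int) (st : PySem.Set Int × PySem.Set Int), t ∉ F →
      pvLevel t S F st = some (F.foldl (fun st pos => pvExpandPos S pos st) st) := by
  intro F
  induction F with
  | nil => intro st _; simp [pvLevel]
  | cons p ps ih =>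
    intro st ht
    have hp : p ≠ t := fun h => ht (by simp [h])
    rw [show pvLevel t S (p :: ps) st = pvLevel t S ps (pvExpandPos S p st) by
        simp [pvLevel, hp]]
    rw [ih _ (fun h => ht (by simp [h])), List.foldl_cons]

theorem pv_reach_le {S : List Int} {j : Nat} {z : Int}
    (h : pvReach S j z) : j ≤ S.length := by
  obtain ⟨l, hl, hlen, -⟩ := h
  exact hlen ▸ (List.mem_sublists.mp hl).length_le

theorem pv_front_step {S : List Int} (hS : ∀ x ∈ S, 0 ≤ x) {d : Nat} {z : Int} :
    ((∃ p, pvMinD S d p ∧ ∃ o ∈ S, z = PySem.Int.bxor p o) ∧ ¬ (∃ j ≤ d, pvReach S j z)) ↔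
      pvMinD S (d + 1) z := by
  constructor
  · rintro ⟨⟨p, ⟨hpd, hpmin⟩, o, ho, rfl⟩, hnz⟩
    have h1 : pvReach S 1 o := pv_reach_singleton ho
    obtain ⟨k, hk, hrk⟩ := pv_reach_join hS (d + 1) (by omega) hpd h1
    have hkd : k = d + 1 := by
      rcases Nat.lt_or_ge k (d + 1) with h | h
      · exact absurd ⟨k, by omega, hrk⟩ hnz
      · omega
    subst hkd
    exact ⟨hrk, fun j hj hrj => hnz ⟨j, by omega, hrj⟩⟩
  · rintro ⟨hrz, hmz⟩
    constructor
    · -- decompose a witness of length d+1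
      obtain ⟨m, hmS, hmlen, hmx⟩ := (pv_reach_subperm hS).mp hrz
      have hmpos : ∀ y ∈ m, 0 ≤ y := fun y hy => hS y (hmS.subset hy)
      obtain ⟨o, m', rfl⟩ : ∃ o m', m = o :: m' := by
        cases m with
        | nil => simp at hmlen
        | cons a b => exact ⟨a, b, rfl⟩
      have hoS : o ∈ S := hmS.subset (by simp)
      have hopos : (0:Int) ≤ o := hS o hoS
      have hm'pos : ∀ y ∈ m', 0 ≤ y := fun y hy => hmpos y (by simp [hy])
      have hp : pvReach S d (pvXorAll m') := by
        refine (pv_reach_subperm hS).mpr ⟨m', ?_, by simpa using hmlen, rfl⟩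
        exact (List.sublist_cons_self o m').subperm.trans hmS
      have hzp : z = PySem.Int.bxor (pvXorAll m') o := by
        rw [← hmx, pv_xorAll_cons, PySem.Int.bxor_comm]
      have hpmin : ∀ j < d, ¬ pvReach S j (pvXorAll m') := by
        intro j hj hrj
        obtain ⟨k, hk, hrk⟩ := pv_reach_join hS (j + 1) (le_refl _) hrj (pv_reach_singleton hoS)
        rw [← hzp] at hrk
        exact hmz k (by omega) hrk
      exact ⟨pvXorAll m', ⟨hp, hpmin⟩, o, hoS, hzp⟩
    · intro hex
      obtain ⟨j, hj, hrj⟩ := hex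
      exact hmz j (by omega) hrj


theorem pv_reach_zero {S : List Int} {z : Int} : pvReach S 0 z ↔ z = 0 := by
  constructor
  · rintro ⟨l, -, hlen, hx⟩
    rw [List.length_eq_zero_iff.mp hlen] at hx
    exact hx.symm
  · rintro rfl
    exact ⟨[], by simp, rfl, rfl⟩

theorem pv_front_nonempty {S : List Int} (hS : ∀ x ∈ S, 0 ≤ x) {dm : Nat} {t : Int}
    (hmin : pvMinD S dm t) : ∀ d ≤ dm, ∃ z, pvMinD S d z := by
  intro d hd
  obtain ⟨l, hlS, hlen, hlx⟩ := (pv_reach_subperm hS).mp hmin.1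
  have hlpos : ∀ y ∈ l, 0 ≤ y := fun y hy => hS y (hlS.subset hy)
  refine ⟨pvXorAll (l.take d), ?_, ?_⟩
  · exact (pv_reach_subperm hS).mpr ⟨l.take d, (List.take_sublist d l).subperm.trans hlS,
      by simp [hlen]; omega, rfl⟩
  · intro j hj hrj
    have hdrop : pvReach S (dm - d) (pvXorAll (l.drop d)) :=
      (pv_reach_subperm hS).mpr ⟨l.drop d, (List.drop_sublist d l).subperm.trans hlS,
        by simp [hlen], rfl⟩
    obtain ⟨k, hk, hrk⟩ := pv_reach_join hS (j + (dm - d)) (le_refl _) hrj hdrop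
    have : PySem.Int.bxor (pvXorAll (l.take d)) (pvXorAll (l.drop d)) = t := by
      rw [← pv_xorAll_append (fun y hy => hlpos y ((List.take_sublist d l).mem hy))
        (fun y hy => hlpos y ((List.drop_sublist d l).mem hy)), List.take_append_drop, hlx]
    rw [this] at hrk
    exact hmin.2 k (by omega) hrk

theorem pv_bfs_eq {t : Int} {S : List Int} (hS : ∀ x ∈ S, 0 ≤ x) {dm : Nat}
    (hmin : pvMinD S dm t) :
    ∀ (fuel : Nat) (d : Nat) (F : List Int) (V : PySem.Set Int),
      (∀ z, z ∈ F ↔ pvMinD S d z) →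
      (∀ z, z ∈ V ↔ ∃ j ≤ d, pvReach S j z) →
      d ≤ dm → dm - d < fuel →
      pvBfs t S fuel F V (d : Int) = (dm : Int) := by
  intro fuel
  induction fuel with
  | zero => intro d F V _ _ _ h; omega
  | succ fuel ih =>
    intro d F V hF hV hd hfuel
    obtain ⟨z0, hz0⟩ := pv_front_nonempty hS hmin d hd
    have hFne : F.isEmpty = false := by
      rw [List.isEmpty_eq_false_iff]
      exact List.ne_nil_of_mem ((hF z0).mpr hz0)
    rw [show pvBfs t S (fuel + 1) F V (d : Int)
        = (match pvLevel t S F (PySem.Set.empty, V) with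
           | none => (d : Int)
           | some (nf, vis) => pvBfs t S fuel nf vis ((d : Int) + 1)) by
      simp [pvBfs, hFne]]
    rcases Nat.eq_or_lt_of_le hd with rfl | hdlt
    · have htF : t ∈ F := (hF t).mpr hmin
      rw [(pv_level_none F (PySem.Set.empty, V)).mpr htF]
    · have htF : t ∉ F := fun h => hmin.2 d hdlt ((hF t).mp h).1
      rw [pv_level_some F _ htF]
      have hinv : ∀ z, z ∈ V ↔ z ∈ (V : List Int) ∨ z ∈ (PySem.Set.empty : PySem.Set Int) := by
        intro z; simp [PySem.Set.empty]
      have hfold := pv_expand_fold (S := S) (V := V) F PySem.Set.empty V hinv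
      set st := F.foldl (fun st pos => pvExpandPos S pos st) (PySem.Set.empty, V) with hst
      have hF' : ∀ z, z ∈ st.1 ↔ pvMinD S (d + 1) z := by
        intro z
        rw [(hfold z).1]
        have : (z ∈ (PySem.Set.empty : PySem.Set Int)) = False := by
          simp [PySem.Set.empty]
        rw [← pv_front_step hS]
        constructor
        · rintro (h | ⟨⟨p, hp, o, ho, rfl⟩, hVz⟩)
          · rw [PySem.Set.empty] at h; simp at h
          · exact ⟨⟨p, (hF p).mp hp, o, ho, rfl⟩, fun hex => hVz ((hV _).mpr hex)⟩
        · rintro ⟨⟨p, hp, o, ho, rfl⟩, hnex⟩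
          exact Or.inr ⟨⟨p, (hF p).mpr hp, o, ho, rfl⟩, fun hVz => hnex ((hV _).mp hVz)⟩
      have hV' : ∀ z, z ∈ st.2 ↔ ∃ j ≤ d + 1, pvReach S j z := by
        intro z
        rw [(hfold z).2, hV z, hF' z]
        constructor
        · rintro (⟨j, hj, hrj⟩ | ⟨hr, -⟩)
          · exact ⟨j, by omega, hrj⟩
          · exact ⟨d + 1, le_refl _, hr⟩
        · rintro ⟨j, hj, hrj⟩
          by_cases hex : ∃ j' ≤ d, pvReach S j' z
          · exact Or.inl hex
          · rcases Nat.eq_or_lt_of_le hj with rfl | hjlt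
            · exact Or.inr ⟨hrj, fun j' hj' hrj' => hex ⟨j', by omega, hrj'⟩⟩
            · exact absurd ⟨j, by omega, hrj⟩ hex
      obtain ⟨nf, vis⟩ := st
      have := ih (d + 1) nf vis hF' hV' (by omega) (by omega)
      push_cast at this ⊢
      exact this




theorem pv_toggle_nonneg (switch : List Int) : 0 ≤ pvMkToggle switch := by
  unfold pvMkToggle
  suffices h : ∀ (l : List Int) (acc : Int), 0 ≤ acc →
      0 ≤ l.foldl (fun toggle v => PySem.Int.bor toggle ((1 : Int) <<< (v.toNat : Nat))) acc by
    exact h switch 0 (le_refl 0)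
  intro l
  induction l with
  | nil => intro acc h; simpa
  | cons v vs ih =>
    intro acc hacc
    refine ih _ ?_
    show 0 ≤ PySem.Int.bor acc ((1:Int) <<< (v.toNat : Nat))
    rw [PySem.Int.bor_of_nonneg hacc (by rw [Int.shiftLeft_eq]; positivity)]
    positivity

theorem pv_toggles_nonneg (switches : List (List Int)) : ∀ x ∈ pvMkToggles switches, 0 ≤ x := by
  unfold pvMkToggles
  rw [PySem.List.foldl_append_singleton_eq_map]
  rintro x hx
  simp only [List.nil_append, List.mem_map] at hx
  obtain ⟨sw, -, rfl⟩ := hx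
  exact pv_toggle_nonneg sw

theorem pv_exists_min {S : List Int} {t : Int} (h : ∃ k, pvReach S k t) :
    ∃ dm, pvMinD S dm t := by
  obtain ⟨k, hk⟩ := h
  induction k using Nat.strong_induction_on with
  | _ k ih =>
    by_cases h' : ∃ j < k, pvReach S j t
    · obtain ⟨j, hj, hrj⟩ := h'
      exact ih j hj hrj
    · exact ⟨k, hk, fun j hj hrj => h' ⟨j, hj, hrj⟩⟩

theorem pv_main (t : Int) (S : List Int) (hS : ∀ x ∈ S, 0 ≤ x)
    (hreach : ∃ k, pvReach S k t) :
    pvBfs t S (2 ^ S.length + 2) [0] (PySem.Set.ofList [0]) 0 =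
      pvDeepen t S (PySem.List.pyRange 0 ((S.length : Int) + 1)) := by
  obtain ⟨dm, hmin⟩ := pv_exists_min hreach
  have hdm : dm ≤ S.length := pv_reach_le hmin.1
  have hleft : pvBfs t S (2 ^ S.length + 2) [0] (PySem.Set.ofList [0]) ((0 : Nat) : Int)
      = (dm : Int) := by
    refine pv_bfs_eq hS hmin _ 0 [0] (PySem.Set.ofList [0]) ?_ ?_ (by omega)
      (by have := @Nat.lt_two_pow_self S.length; omega)
    · intro z
      simp only [List.mem_singleton]
      constructor
      · rintro rfl
        exact ⟨pv_reach_zero.mpr rfl, by omega⟩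
      · rintro ⟨hr, -⟩
        exact pv_reach_zero.mp hr
    · intro z
      show z ∈ [(0:Int)] ↔ _
      simp only [List.mem_singleton]
      constructor
      · rintro rfl
        exact ⟨0, le_refl _, pv_reach_zero.mpr rfl⟩
      · rintro ⟨j, hj, hrj⟩
        have : j = 0 := by omega
        subst this
        exact pv_reach_zero.mp hrj
  have hright := pv_deepen_eq hS hmin (by omega) 0 (by omega)
  rw [show ((0:Nat):Int) = (0:Int) by norm_num] at hleft hright
  rw [hleft, hright]

-- ===== VERDICT (by name: the statement is the Claim_ definition above) =====
theorem toggle_switches_spec : Claim_equal_toggle_switches := by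
  intro target switches _ hpre
  unfold Spec_toggle_switches toggle_switches toggle_switches_alt
  obtain ⟨-, hany⟩ := hpre
  refine pv_main _ _ (pv_toggles_nonneg switches) ?_
  rw [List.any_eq_true] at hany
  obtain ⟨l, hl, hx⟩ := hany
  exact ⟨l.length, l, hl, rfl, by simpa [beq_iff_eq] using hx⟩
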